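-- pv_equiv track=rewrite | github.com/JasonZhLiang/bc-monaco-dts-files-generator | updated-version-generator.py | sanitizeParameterType
-- ===== SOURCE A (Python) =====
-- def sanitizeParameterType(sourceParameterType):
--     sanitizedParameterType = sourceParameterType.lstrip().rstrip()
--
--     if sanitizedParameterType.find("|") == -1:
--         sanitizedParameterType = sourceParameterType.lstrip().rstrip().lower()
--
--     if sanitizedParameterType == "string":
--         return "string"
--     elif sanitizedParameterType == "number" or sanitizedParameterType == "integer" or sanitizedParameterType == "int" or sanitizedParameterType == "long" or sanitizedParameterType == "float" or sanitizedParameterType == "double" or sanitizedParameterType == "biginteger":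
--         return "number"
--     elif sanitizedParameterType == "boolean" or sanitizedParameterType == "bool":
--         return "boolean"
--     elif sanitizedParameterType == "nativeobject":
--         return "Object"
--     elif sanitizedParameterType == "nativearray":
--         return "Array<any>"
--     elif sanitizedParameterType == "stringarray":
--         return "Array<string>"
--     elif sanitizedParameterType == "numberarray" or sanitizedParameterType == "integerarray" or sanitizedParameterType == "intarray" or sanitizedParameterType == "longarray" or sanitizedParameterType == "floatarray" or sanitizedParameterType == "doublearray" or sanitizedParameterType == "bigintegerarray":
--         return "Array<number>"
--     elif sanitizedParameterType == "booleanarray" or sanitizedParameterType == "boolarray":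
--         return "Array<boolean>"
--     elif sanitizedParameterType == "map":
--         return "Map<any, any>"
--     elif sanitizedParameterType == "list":
--         return "Array<any>"
--     else:
--         if sourceParameterType.find("|") > -1:
--             parts = sourceParameterType.split("|")
--
--             multiPartString = ""
--
--             for part in parts:
--                 if len(multiPartString) > 0:
--                     multiPartString = multiPartString + " | " + "\"" + part.lstrip().rstrip() + "\""
--                 else:
--                     multiPartString = "\"" + part.lstrip().rstrip() + "\""
--
--             return multiPartString
--         else:
--             return sourceParameterType.lstrip().rstrip()
-- ===== SOURCE B (Python) =====
-- NUMERIC = ("number", "integer", "int", "long", "float", "double", "biginteger")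
--
-- SPECIAL = {"nativeobject": "Object", "map": "Map<any, any>", "list": "Array<any>"}
--
--
-- def _scalarType(key):
--     """TypeScript type of a scalar key, or None."""
--     if key == "string":
--         return "string"
--     if key in NUMERIC:
--         return "number"
--     if key in ("boolean", "bool"):
--         return "boolean"
--     return None
--
--
-- def _resolve(key):
--     """Resolve a normalized key by factoring it as base-scalar + optional
--     'array' suffix, instead of enumerating every combined name."""
--     result = _scalarType(key)
--     if result is None and key.endswith("array"):
--         base = key[:-5]
--         elem = "any" if base == "native" else _scalarType(base)
--         if elem is not None:
--             result = "Array<" + elem + ">"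
--     if result is None:
--         result = SPECIAL.get(key)
--     return result
--
--
-- def sanitizeParameterType(sourceParameterType):
--     stripped = sourceParameterType.strip()
--     key = stripped if "|" in stripped else stripped.lower()
--     result = _resolve(key)
--     if result is not None:
--         return result
--     if "|" in sourceParameterType:
--         return " | ".join('"' + part.strip() + '"' for part in sourceParameterType.split("|"))
--     return stripped
-- ===== Notes on version B (the rewrite author's own statement) =====
-- stated objective: alternative
-- what changed: Instead of A's flat ~24-name elif chain, B factors each key into a base scalar type plus an optional array-kind suffix, resolves the scalar once and composes the generic TypeScript array form from it (with a 3-entry residual map), and builds the quoted union with str.join instead of an accumulator loop.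
import Mathlib
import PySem

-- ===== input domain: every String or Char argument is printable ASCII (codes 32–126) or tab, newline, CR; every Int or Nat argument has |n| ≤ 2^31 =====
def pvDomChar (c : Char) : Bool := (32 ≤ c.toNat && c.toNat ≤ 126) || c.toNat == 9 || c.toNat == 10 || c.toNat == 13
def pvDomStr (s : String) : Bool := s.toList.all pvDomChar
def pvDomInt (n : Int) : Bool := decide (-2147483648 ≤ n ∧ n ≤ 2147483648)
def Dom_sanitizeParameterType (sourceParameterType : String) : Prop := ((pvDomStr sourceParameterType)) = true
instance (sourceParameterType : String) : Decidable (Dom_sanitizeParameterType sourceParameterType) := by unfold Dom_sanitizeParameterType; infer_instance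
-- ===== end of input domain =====

-- B resolves the key by factoring it into a base scalar plus an optional array-kind suffix and composing the generic array form, instead of A's flat elif enumeration; joins the quoted union pieces; same behaviour (alternative decomposition).

-- ===== PORT A =====
def sanitizeParameterType (sourceParameterType : String) : String :=
  let sanitizedParameterType := PySem.Str.rstrip (PySem.Str.lstrip sourceParameterType)
  let sanitizedParameterType :=
    if PySem.Str.find sanitizedParameterType "|" == -1 then
      PySem.Str.lower (PySem.Str.rstrip (PySem.Str.lstrip sourceParameterType))
    else sanitizedParameterType
  if sanitizedParameterType == "string" then "string"
  else if sanitizedParameterType == "number" || sanitizedParameterType == "integer" || sanitizedParameterType == "int" || sanitizedParameterType == "long" || sanitizedParameterType == "float" || sanitizedParameterType == "double" || sanitizedParameterType == "biginteger" then "number"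
  else if sanitizedParameterType == "boolean" || sanitizedParameterType == "bool" then "boolean"
  else if sanitizedParameterType == "nativeobject" then "Object"
  else if sanitizedParameterType == "nativearray" then "Array<any>"
  else if sanitizedParameterType == "stringarray" then "Array<string>"
  else if sanitizedParameterType == "numberarray" || sanitizedParameterType == "integerarray" || sanitizedParameterType == "intarray" || sanitizedParameterType == "longarray" || sanitizedParameterType == "floatarray" || sanitizedParameterType == "doublearray" || sanitizedParameterType == "bigintegerarray" then "Array<number>"
  else if sanitizedParameterType == "booleanarray" || sanitizedParameterType == "boolarray" then "Array<boolean>"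
  else if sanitizedParameterType == "map" then "Map<any, any>"
  else if sanitizedParameterType == "list" then "Array<any>"
  else
    if PySem.Str.find sourceParameterType "|" > -1 then
      let parts := (PySem.Str.split? sourceParameterType "|").getD []
      parts.foldl
        (fun multiPartString part =>
          if PySem.Str.len multiPartString > 0 then
            multiPartString ++ " | " ++ "\"" ++ PySem.Str.rstrip (PySem.Str.lstrip part) ++ "\""
          else
            "\"" ++ PySem.Str.rstrip (PySem.Str.lstrip part) ++ "\"") ""
    else PySem.Str.rstrip (PySem.Str.lstrip sourceParameterType)

-- ===== PORT B =====
-- TypeScript type of a scalar key, or none (Python helper _scalarType)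
def pvScalarType (key : String) : Option String :=
  if key == "string" then some "string"
  else if key == "number" || key == "integer" || key == "int" || key == "long" || key == "float" || key == "double" || key == "biginteger" then some "number"
  else if key == "boolean" || key == "bool" then some "boolean"
  else none

def pvSpecial : PySem.Dict String String :=
  PySem.Dict.ofList [("nativeobject", "Object"), ("map", "Map<any, any>"), ("list", "Array<any>")]

-- Python helper _resolve: base scalar + optional "array" suffix, then residual map
def pvResolve (key : String) : Option String :=
  let result := pvScalarType key
  let result :=
    match result with
    | some r => some r
    | none =>
      if PySem.Str.endswith key "array" then
        let base := PySem.Str.slice key none (some (-5))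
        let elem := if base == "native" then some "any" else pvScalarType base
        match elem with
        | some e => some ("Array<" ++ e ++ ">")
        | none => none
      else none
  match result with
  | some r => some r
  | none => PySem.Dict.get? pvSpecial key

def sanitizeParameterType_alt (sourceParameterType : String) : String :=
  let stripped := PySem.Str.strip sourceParameterType
  let key := if PySem.Str.isIn "|" stripped then stripped else PySem.Str.lower stripped
  match pvResolve key with
  | some result => result
  | none =>
    if PySem.Str.isIn "|" sourceParameterType then
      PySem.Str.join " | "
        (((PySem.Str.split? sourceParameterType "|").getD []).map
          (fun part => "\"" ++ PySem.Str.strip part ++ "\""))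
    else stripped

-- ===== PRECONDITION & SPEC =====
def Spec_sanitizeParameterType (sourceParameterType : String) (out : String) : Prop := out = sanitizeParameterType_alt sourceParameterType
instance (sourceParameterType : String) (out : String) : Decidable (Spec_sanitizeParameterType sourceParameterType out) := by unfold Spec_sanitizeParameterType; infer_instance

-- ===== CLAIM (what is proved, stated in full; the proofs are below) =====
def Claim_equal_sanitizeParameterType : Prop := ∀ (sourceParameterType : String), Dom_sanitizeParameterType sourceParameterType → Spec_sanitizeParameterType sourceParameterType (sanitizeParameterType sourceParameterType)

-- ===== LEMMAS AND PROOFS =====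

lemma pvStrip_eq (s : String) : PySem.Str.rstrip (PySem.Str.lstrip s) = PySem.Str.strip s := by
  apply String.toList_inj.mp
  simp [PySem.Chars.strip]

lemma pvFind_beq (s : String) : (PySem.Str.find s "|" == -1) = !(PySem.Str.isIn "|" s) := by
  have h1 := PySem.Str.find_eq_neg_one_iff s "|"
  have h2 := PySem.Str.isIn_iff_infix "|" s
  cases h : PySem.Str.isIn "|" s <;> simp_all

lemma pvFind_gt (cs : List Char) : ((-1 : Int) < PySem.Chars.find cs ['|']) ↔ PySem.Chars.isIn ['|'] cs = true := by
  have h0 := PySem.Chars.find_nonneg_iff cs ['|']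
  have h2 := PySem.Chars.isIn_iff_infix ['|'] cs
  constructor
  · intro h; rw [h2, ← h0]; omega
  · intro h; rw [h2] at h; rw [← h0] at h; omega

lemma pvScalar_none (key : String)
    (h1 : key ≠ "string") (h2 : key ≠ "number") (h3 : key ≠ "integer") (h4 : key ≠ "int")
    (h5 : key ≠ "long") (h6 : key ≠ "float") (h7 : key ≠ "double") (h8 : key ≠ "biginteger")
    (h9 : key ≠ "boolean") (h10 : key ≠ "bool") : pvScalarType key = none := by
  simp [pvScalarType, h1, h2, h3, h4, h5, h6, h7, h8, h9, h10]

-- key ends with "array": its slice key[:-5] is the prefix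
lemma pvBase_of_endswith (key : String) (pre : List Char)
    (hk : key.toList = pre ++ "array".toList) :
    (PySem.Str.slice key none (some (-5))).toList = pre := by
  have h5 : (5:Nat) > 1 := by omega
  rw [PySem.Str.toList_slice, PySem.Chars.slice_eq_listSlice,
      show ((-5 : Int)) = -(5:Nat) from by norm_num,
      PySem.List.slice_to_neg_natCast _ _ (by omega)]
  rw [hk]
  simp

set_option maxHeartbeats 4000000 in
lemma pvChain_resolve (key E : String) :
    (if key == "string" then "string"
     else if key == "number" || key == "integer" || key == "int" || key == "long" || key == "float" || key == "double" || key == "biginteger" then "number"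
     else if key == "boolean" || key == "bool" then "boolean"
     else if key == "nativeobject" then "Object"
     else if key == "nativearray" then "Array<any>"
     else if key == "stringarray" then "Array<string>"
     else if key == "numberarray" || key == "integerarray" || key == "intarray" || key == "longarray" || key == "floatarray" || key == "doublearray" || key == "bigintegerarray" then "Array<number>"
     else if key == "booleanarray" || key == "boolarray" then "Array<boolean>"
     else if key == "map" then "Map<any, any>"
     else if key == "list" then "Array<any>"
     else E)
    = (match pvResolve key with | some r => r | none => E) := by
  by_cases h1 : key = "string"
  · subst h1; rfl
  by_cases h2 : key = "number"
  · subst h2; rfl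
  by_cases h3 : key = "integer"
  · subst h3; rfl
  by_cases h4 : key = "int"
  · subst h4; rfl
  by_cases h5 : key = "long"
  · subst h5; rfl
  by_cases h6 : key = "float"
  · subst h6; rfl
  by_cases h7 : key = "double"
  · subst h7; rfl
  by_cases h8 : key = "biginteger"
  · subst h8; rfl
  by_cases h9 : key = "boolean"
  · subst h9; rfl
  by_cases h10 : key = "bool"
  · subst h10; rfl
  by_cases h11 : key = "nativeobject"
  · subst h11; rfl
  by_cases h12 : key = "nativearray"
  · subst h12; rfl
  by_cases h13 : key = "stringarray"
  · subst h13; rfl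
  by_cases h14 : key = "numberarray"
  · subst h14; rfl
  by_cases h15 : key = "integerarray"
  · subst h15; rfl
  by_cases h16 : key = "intarray"
  · subst h16; rfl
  by_cases h17 : key = "longarray"
  · subst h17; rfl
  by_cases h18 : key = "floatarray"
  · subst h18; rfl
  by_cases h19 : key = "doublearray"
  · subst h19; rfl
  by_cases h20 : key = "bigintegerarray"
  · subst h20; rfl
  by_cases h21 : key = "booleanarray"
  · subst h21; rfl
  by_cases h22 : key = "boolarray"
  · subst h22; rfl
  by_cases h23 : key = "map"
  · subst h23; rfl
  by_cases h24 : key = "list"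
  · subst h24; rfl
  -- key matches none of the 24 names: both sides are E
  have hscalar : pvScalarType key = none := pvScalar_none key h1 h2 h3 h4 h5 h6 h7 h8 h9 h10
  have harr :
      (if PySem.Str.endswith key "array" then
        let base := PySem.Str.slice key none (some (-5))
        let elem := if base == "native" then some "any" else pvScalarType base
        match elem with
        | some e => some ("Array<" ++ e ++ ">")
        | none => (none : Option String)
      else none) = none := by
    by_cases he : PySem.Str.endswith key "array" = true
    · rw [if_pos he]
      have hsuf : "array".toList <:+ key.toList := by
        have := PySem.Chars.endswith_iff key.toList "array".toList
        simp only [← PySem.Str.endswith_eq] at this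
        exact this.mp he
      obtain ⟨pre, hk⟩ := hsuf
      have hbase : (PySem.Str.slice key none (some (-5))).toList = pre :=
        pvBase_of_endswith key pre hk.symm
      have hkey_of : ∀ (p : String), pre = p.toList → key = p ++ "array" := by
        intro p hp
        apply String.toList_inj.mp
        rw [← hk, hp]
        simp
      have hbn : ¬ (PySem.Str.slice key none (some (-5)) = "native") := by
        intro hb
        exact h12 ((hkey_of "native" (by rw [← hbase, hb])).trans (by decide))
      have hbs : pvScalarType (PySem.Str.slice key none (some (-5))) = none := by
        apply pvScalar_none <;> intro hb
        · exact h13 ((hkey_of "string" (by rw [← hbase, hb])).trans (by decide))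
        · exact h14 ((hkey_of "number" (by rw [← hbase, hb])).trans (by decide))
        · exact h15 ((hkey_of "integer" (by rw [← hbase, hb])).trans (by decide))
        · exact h16 ((hkey_of "int" (by rw [← hbase, hb])).trans (by decide))
        · exact h17 ((hkey_of "long" (by rw [← hbase, hb])).trans (by decide))
        · exact h18 ((hkey_of "float" (by rw [← hbase, hb])).trans (by decide))
        · exact h19 ((hkey_of "double" (by rw [← hbase, hb])).trans (by decide))
        · exact h20 ((hkey_of "biginteger" (by rw [← hbase, hb])).trans (by decide))
        · exact h21 ((hkey_of "boolean" (by rw [← hbase, hb])).trans (by decide))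
        · exact h22 ((hkey_of "bool" (by rw [← hbase, hb])).trans (by decide))
      simp [hbn, hbs]
    · rw [if_neg he]
  have hspec : PySem.Dict.get? pvSpecial key = none := by
    have b11 : (("nativeobject" : String) == key) = false := by simpa using (Ne.symm h11)
    have b23 : (("map" : String) == key) = false := by simpa using (Ne.symm h23)
    have b24 : (("list" : String) == key) = false := by simpa using (Ne.symm h24)
    rw [show pvSpecial = PySem.Dict.mk [("nativeobject", "Object"), ("map", "Map<any, any>"), ("list", "Array<any>")] from rfl]
    simp [PySem.Dict.get?, List.find?, b11, b23, b24]
  have a1 : (key == "string") = false := by simpa using h1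
  have a2 : (key == "number") = false := by simpa using h2
  have a3 : (key == "integer") = false := by simpa using h3
  have a4 : (key == "int") = false := by simpa using h4
  have a5 : (key == "long") = false := by simpa using h5
  have a6 : (key == "float") = false := by simpa using h6
  have a7 : (key == "double") = false := by simpa using h7
  have a8 : (key == "biginteger") = false := by simpa using h8
  have a9 : (key == "boolean") = false := by simpa using h9
  have a10 : (key == "bool") = false := by simpa using h10
  have a11 : (key == "nativeobject") = false := by simpa using h11
  have a12 : (key == "nativearray") = false := by simpa using h12
  have a13 : (key == "stringarray") = false := by simpa using h13
  have a14 : (key == "numberarray") = false := by simpa using h14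
  have a15 : (key == "integerarray") = false := by simpa using h15
  have a16 : (key == "intarray") = false := by simpa using h16
  have a17 : (key == "longarray") = false := by simpa using h17
  have a18 : (key == "floatarray") = false := by simpa using h18
  have a19 : (key == "doublearray") = false := by simpa using h19
  have a20 : (key == "bigintegerarray") = false := by simpa using h20
  have a21 : (key == "booleanarray") = false := by simpa using h21
  have a22 : (key == "boolarray") = false := by simpa using h22
  have a23 : (key == "map") = false := by simpa using h23
  have a24 : (key == "list") = false := by simpa using h24
  simp only [a1, a2, a3, a4, a5, a6, a7, a8, a9, a10, a11, a12, a13, a14, a15, a16, a17, a18, a19, a20, a21, a22, a23, a24, Bool.or_false, Bool.false_eq_true, if_false]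
  simp only [pvResolve, hscalar]
  rw [harr]
  simp [hspec]

lemma pvLen_pos (acc : String) (h : acc.toList ≠ []) : PySem.Str.len acc > 0 := by
  have := List.length_pos_iff.mpr h
  simpa [PySem.Str.len_eq] using this

lemma pvJoin_expand (q : List Char) (qs : List (List Char)) :
    PySem.Chars.join (" | ".toList) (q :: qs)
      = q ++ (qs.map (fun r => " | ".toList ++ r)).flatten := by
  induction qs generalizing q with
  | nil => simp [PySem.Chars.join_singleton]
  | cons r rs ih => rw [PySem.Chars.join_cons_cons, ih r]; simp

lemma pvFold_aux (parts : List String) (acc : String) (h : acc.toList ≠ []) :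
    (parts.foldl
      (fun multiPartString part =>
        if PySem.Str.len multiPartString > 0 then
          multiPartString ++ " | " ++ "\"" ++ PySem.Str.strip part ++ "\""
        else
          "\"" ++ PySem.Str.strip part ++ "\"") acc).toList
    = acc.toList ++ ((parts.map (fun p => " | ".toList ++ ("\"" ++ PySem.Str.strip p ++ "\"").toList)).flatten) := by
  induction parts generalizing acc with
  | nil => simp
  | cons p ps ih =>
    simp only [List.foldl_cons]
    rw [if_pos (pvLen_pos _ h)]
    rw [ih _ (by simp)]
    simp [List.append_assoc]

lemma pvFold_join (parts : List String) :
    (parts.foldl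
      (fun multiPartString part =>
        if PySem.Str.len multiPartString > 0 then
          multiPartString ++ " | " ++ "\"" ++ PySem.Str.strip part ++ "\""
        else
          "\"" ++ PySem.Str.strip part ++ "\"") "")
    = PySem.Str.join " | " (parts.map (fun part => "\"" ++ PySem.Str.strip part ++ "\"")) := by
  cases parts with
  | nil => rfl
  | cons p ps =>
    apply String.toList_inj.mp
    simp only [List.foldl_cons]
    rw [if_neg (by decide)]
    rw [pvFold_aux _ _ (by simp)]
    rw [PySem.Str.toList_join]
    simp only [List.map_cons, List.map_map]
    rw [pvJoin_expand]
    simp [Function.comp_def]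

-- ===== VERDICT (by name: the statement is the Claim_ definition above) =====
set_option maxHeartbeats 4000000 in
theorem sanitizeParameterType_spec : Claim_equal_sanitizeParameterType := by
  unfold Claim_equal_sanitizeParameterType Spec_sanitizeParameterType
  intro s _
  unfold sanitizeParameterType sanitizeParameterType_alt
  simp only [pvStrip_eq]
  rw [pvFind_beq]
  rw [pvFold_join, pvChain_resolve]
  by_cases h : PySem.Chars.isIn ['|'] (PySem.Chars.strip s.toList) = true <;>
    by_cases hs : PySem.Chars.isIn ['|'] s.toList = true <;>
      simp [pvFind_gt, h, hs]
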